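-- pv_equiv track=rewrite | github.com/ana-mc-almeida/1Projeto-FP | projeto_102618.py | eh_cifra
-- ===== SOURCE A (Python) =====
-- def eh_cifra(cifra):
--     '''
--     eh_cifra: string -> booleano
--
--     Retorna True caso o argumento recebido seja uma cifra.
--     Uma cadeira de caracteres é uma cifra se contiver uma ou mais palavras (só letras minúsculas), separadas por traços.
--     '''
--     comprimento = len(cifra)
--     if type(cifra) != str or comprimento < 1:
--         return False
--     for i in range(comprimento):                                # verifica se o argumento apenas palavras constituidas
--         if not 97 <= ord(cifra[i]) <= 122 and cifra[i] != "-":  # por letras minusculas, separedas por -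
--             return False
--     return True
-- ===== SOURCE B (Python) =====
-- def eh_cifra(cifra):
--     if type(cifra) != str or len(cifra) < 1:
--         return False
--     return all(p == "" or (p.isalpha() and p == p.lower())
--                for p in cifra.split("-"))
-- ===== Notes on version B (the rewrite author's own statement) =====
-- stated objective: alternative
-- what changed: Instead of scanning character-by-character with ord-range comparisons, B splits the string into words at the dash separator and validates each word as a whole with string predicates (empty, or isalpha and equal to its lowercase form).
import Mathlib
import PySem

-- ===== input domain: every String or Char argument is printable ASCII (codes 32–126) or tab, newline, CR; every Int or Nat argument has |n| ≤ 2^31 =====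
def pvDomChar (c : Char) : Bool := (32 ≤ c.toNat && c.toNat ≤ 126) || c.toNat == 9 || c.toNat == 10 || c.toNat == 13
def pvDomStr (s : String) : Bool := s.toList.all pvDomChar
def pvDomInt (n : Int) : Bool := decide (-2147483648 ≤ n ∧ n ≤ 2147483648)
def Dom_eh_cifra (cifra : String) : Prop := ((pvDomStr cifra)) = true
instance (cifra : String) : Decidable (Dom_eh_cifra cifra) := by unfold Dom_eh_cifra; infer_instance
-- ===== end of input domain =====

-- B validates word-by-word: split on '-' and test each piece with isalpha + lowercase-idempotence,
-- instead of A's per-character ord-range scan (alternative decomposition; same cost).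

-- ===== PORT A =====
-- the for-loop over range(comprimento) with its early 'return False'
def pvALoop (s : List Char) : List Int → Bool
  | [] => true
  | i :: rest =>
    match PySem.List.pyGet? s i with
    | none => false   -- unreachable: i is a valid index
    | some c =>
      if ¬ (97 ≤ c.toNat ∧ c.toNat ≤ 122) ∧ c ≠ '-' then false
      else pvALoop s rest

def eh_cifra (cifra : String) : Bool :=
  let comprimento : Int := (cifra.toList.length : Int)
  if comprimento < 1 then false
  else pvALoop cifra.toList (PySem.List.pyRange 0 comprimento 1)

-- ===== PORT B =====
-- the per-piece test 'p == "" or (p.isalpha() and p == p.lower())'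
def pvPieceOk (p : List Char) : Bool :=
  p == [] || (PySem.Chars.strIsalpha p && p == PySem.Chars.lower p)

def eh_cifra_alt (cifra : String) : Bool :=
  if (cifra.toList.length : Int) < 1 then false
  else (PySem.Chars.splitOn cifra.toList ['-']).all pvPieceOk

-- ===== PRECONDITION & SPEC =====
def Spec_eh_cifra (cifra : String) (out : Bool) : Prop := out = eh_cifra_alt cifra
instance (cifra : String) (out : Bool) : Decidable (Spec_eh_cifra cifra out) := by unfold Spec_eh_cifra; infer_instance

-- ===== CLAIM (what is proved, stated in full; the proofs are below) =====
def Claim_equal_eh_cifra : Prop := ∀ (cifra : String), Dom_eh_cifra cifra → Spec_eh_cifra cifra (eh_cifra cifra)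

-- ===== LEMMAS AND PROOFS =====

def pvOk (c : Char) : Bool := (97 ≤ c.toNat && c.toNat ≤ 122) || c = '-'

theorem pvALoop_eq_all (s : List Char) (n : Nat) :
    pvALoop s (PySem.List.pyRange (n : Int) (s.length : Int) 1) = (s.drop n).all pvOk := by
  by_cases h : n < s.length
  · rw [PySem.List.pyRange_one_cons (by exact_mod_cast h)]
    rw [List.drop_eq_getElem_cons h, List.all_cons]
    unfold pvALoop
    rw [PySem.List.pyGet?_natCast]
    simp only [List.getElem?_eq_getElem h]
    have hrec : ((n : Int) + 1) = ((n + 1 : Nat) : Int) := by push_cast; ring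
    rw [hrec, pvALoop_eq_all s (n + 1)]
    by_cases hc : ¬ (97 ≤ (s[n]).toNat ∧ (s[n]).toNat ≤ 122) ∧ s[n] ≠ '-'
    · have hfalse : pvOk s[n] = false := by
        unfold pvOk
        obtain ⟨h1, h2⟩ := hc
        simp only [Bool.or_eq_false_iff, Bool.and_eq_false_iff, decide_eq_false_iff_not]
        exact ⟨by omega, h2⟩
      rw [if_pos hc, hfalse, Bool.false_and]
    · have htrue : pvOk s[n] = true := by
        unfold pvOk
        rcases Decidable.not_and_iff_not_or_not.mp hc with h1 | h2
        · have := not_not.mp h1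
          simp [this.1, this.2]
        · have := not_not.mp h2
          simp [this]
      rw [if_neg hc, htrue, Bool.true_and]
  · rw [PySem.List.pyRange_one_eq_nil (by exact_mod_cast Nat.le_of_not_lt h)]
    rw [List.drop_eq_nil_of_le (Nat.le_of_not_lt h)]
    rfl
termination_by s.length - n

-- l.map f = l exactly when f fixes every element of l
theorem pvMapFix (f : Char → Char) (l : List Char) :
    l.map f = l ↔ ∀ x ∈ l, f x = x := by
  induction l with
  | nil => simp
  | cons c rest ih =>
    simp only [List.map_cons, List.cons.injEq, List.mem_cons, forall_eq_or_imp, ih]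

-- an uppercase letter is moved by lowerChar
theorem pvLowerChar_ne (c : Char) (h : PySem.Chars.isupper c = true) :
    PySem.Chars.lowerChar c ≠ c := by
  unfold PySem.Chars.isupper at h
  simp only [Bool.and_eq_true, decide_eq_true_eq] at h
  have h1 : 65 ≤ c.toNat := h.1
  have h2 : c.toNat ≤ 90 := h.2
  have heq : c = Char.ofNat c.toNat := (Char.ofNat_toNat c).symm
  rw [heq]
  interval_cases hk : c.toNat <;> decide

-- character-class facts
theorem pvIslower_toNat (c : Char) :
    PySem.Chars.islower c = true ↔ 97 ≤ c.toNat ∧ c.toNat ≤ 122 := by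
  unfold PySem.Chars.islower
  rw [Bool.and_eq_true, decide_eq_true_eq, decide_eq_true_eq,
    Char.le_def, Char.le_def, UInt32.le_iff_toNat_le, UInt32.le_iff_toNat_le,
    show ('a' : Char).val.toNat = 97 from rfl, show ('z' : Char).val.toNat = 122 from rfl]
  exact Iff.rfl

theorem pvIsupper_toNat (c : Char) :
    PySem.Chars.isupper c = true ↔ 65 ≤ c.toNat ∧ c.toNat ≤ 90 := by
  unfold PySem.Chars.isupper
  rw [Bool.and_eq_true, decide_eq_true_eq, decide_eq_true_eq,
    Char.le_def, Char.le_def, UInt32.le_iff_toNat_le, UInt32.le_iff_toNat_le,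
    show ('A' : Char).val.toNat = 65 from rfl, show ('Z' : Char).val.toNat = 90 from rfl]
  exact Iff.rfl

-- the per-piece test IS 'every character is a lowercase letter'
theorem pvPieceOk_eq (p : List Char) : pvPieceOk p = p.all PySem.Chars.islower := by
  cases p with
  | nil => rfl
  | cons c rest =>
    unfold pvPieceOk PySem.Chars.strIsalpha PySem.Chars.lower
    apply Bool.coe_iff_coe.mp
    simp only [Bool.or_eq_true, Bool.and_eq_true, beq_iff_eq, List.all_eq_true,
      List.isEmpty_cons, Bool.not_false, Bool.true_and]
    constructor
    · rintro (h | ⟨hal, hmap⟩)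
      · cases h
      · intro x hx
        have hfix : PySem.Chars.lowerChar x = x :=
          (pvMapFix PySem.Chars.lowerChar (c :: rest)).mp hmap.symm x hx
        have hup : PySem.Chars.isupper x = false := by
          by_contra hb
          exact pvLowerChar_ne x (Bool.of_not_eq_false hb) hfix
        have ha := hal x hx
        unfold PySem.Chars.isalpha at ha
        rcases Bool.or_eq_true_iff.mp ha with hu | hl
        · rw [hup] at hu; cases hu
        · exact hl
    · intro h
      right
      refine ⟨?_, ?_⟩
      · intro x hx
        unfold PySem.Chars.isalpha
        exact Bool.or_eq_true_iff.mpr (Or.inr (h x hx))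
      · symm
        apply (pvMapFix PySem.Chars.lowerChar (c :: rest)).mpr
        intro x hx
        have hl := (pvIslower_toNat x).mp (h x hx)
        have hup : PySem.Chars.isupper x = false := by
          by_contra hb
          have := (pvIsupper_toNat x).mp (Bool.of_not_eq_false hb)
          omega
        unfold PySem.Chars.lowerChar
        rw [hup]
        simp

-- structural model of splitOn.go for the single-char separator '-' (cur is the reversed current piece)
def pvSplitF (cur : List Char) : List Char → List (List Char)
  | [] => [cur.reverse]
  | c :: rest => if c = '-' then cur.reverse :: pvSplitF [] rest else pvSplitF (c :: cur) rest

theorem pvGo_eq (l : List Char) : ∀ (fuel : Nat) (cur : List Char) (acc : List (List Char)),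
    l.length ≤ fuel →
    PySem.Chars.splitOn.go ['-'] fuel l cur acc = acc.reverse ++ pvSplitF cur l := by
  induction l with
  | nil =>
    intro fuel cur acc _
    cases fuel <;> simp [PySem.Chars.splitOn.go, pvSplitF]
  | cons c rest ih =>
    intro fuel cur acc hlen
    cases fuel with
    | zero => simp at hlen
    | succ fuel =>
      rw [PySem.Chars.splitOn.go]
      have hpre : (['-'] : List Char).isPrefixOf (c :: rest) = (c == '-') := by
        simp [List.isPrefixOf, BEq.comm]
      rw [hpre]
      by_cases hc : c = '-'
      · rw [if_pos (by simp [hc])]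
        simp only [List.length_cons] at hlen
        simp only [List.length_singleton, List.drop_succ_cons, List.drop_zero]
        rw [ih fuel [] (cur.reverse :: acc) (by omega)]
        simp [pvSplitF, hc]
      · rw [if_neg (by simp [hc])]
        simp only [List.length_cons] at hlen
        rw [ih fuel (c :: cur) acc (by omega)]
        simp [pvSplitF, hc]

theorem pvSplitOn_eq (s : List Char) :
    PySem.Chars.splitOn s ['-'] = pvSplitF [] s := by
  unfold PySem.Chars.splitOn
  rw [pvGo_eq s (s.length + 1) [] [] (by omega)]
  rfl

-- all pieces all-lowercase ⟺ every character is lowercase-or-dash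
theorem pvSplitF_all (l cur : List Char) :
    (pvSplitF cur l).all (fun p => p.all PySem.Chars.islower) =
      (cur.all PySem.Chars.islower && l.all (fun c => PySem.Chars.islower c || c == '-')) := by
  induction l generalizing cur with
  | nil => simp [pvSplitF]
  | cons c rest ih =>
    unfold pvSplitF
    by_cases hc : c = '-'
    · rw [if_pos hc]
      simp only [List.all_cons, ih, List.all_nil, List.all_reverse, Bool.true_and]
      subst hc
      simp [PySem.Chars.islower]
    · rw [if_neg hc]
      rw [ih]
      simp only [List.all_cons]
      have : (c == '-') = false := by simp [hc]
      rw [this, Bool.or_false]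
      ac_rfl

-- the two per-character predicates coincide
theorem pvOk_eq (c : Char) : pvOk c = (PySem.Chars.islower c || c == '-') := by
  unfold pvOk
  apply Bool.coe_iff_coe.mp
  simp only [Bool.or_eq_true, Bool.and_eq_true, decide_eq_true_eq, beq_iff_eq,
    pvIslower_toNat]

-- ===== VERDICT (by name: the statement is the Claim_ definition above) =====
theorem eh_cifra_spec : Claim_equal_eh_cifra := by
  intro cifra _
  unfold Spec_eh_cifra eh_cifra eh_cifra_alt
  by_cases h : ((cifra.toList.length : Int) < 1)
  · rw [if_pos h, if_pos h]
  · rw [if_neg h, if_neg h]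
    have hA := pvALoop_eq_all cifra.toList 0
    simp only [List.drop_zero] at hA
    rw [show ((0 : Int) = ((0 : Nat) : Int)) by norm_num, hA]
    rw [pvSplitOn_eq]
    have hB : (pvSplitF [] cifra.toList).all pvPieceOk =
        (pvSplitF [] cifra.toList).all (fun p => p.all PySem.Chars.islower) := by
      exact List.all_congr rfl (fun p => pvPieceOk_eq p)
    rw [hB, pvSplitF_all]
    simp only [List.all_nil, Bool.true_and]
    exact List.all_congr rfl (fun c => pvOk_eq c)
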